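-- pv_equiv track=rewrite | github.com/raphaeltournafond/binomial-random-walk | main.py | compute_x_y_z_2d
-- ===== SOURCE A (Python) =====
-- def compute_x_y_z_2d(x, y):
--     d = {}
--     for i in range(0, len(x)):
--         key = (x[i], y[i])
--         if key in d:
--             d[key] += 1
--         else:
--             d[key] = 1
--     x = []
--     y = []
--     z = []
--     for key in sorted(d):
--         x.append(key[0])
--         y.append(key[1])
--         z.append(d[key])
--
--     return x, y, z
-- ===== SOURCE B (Python) =====
-- def compute_x_y_z_2d(x, y):
--     pairs = sorted((x[i], y[i]) for i in range(len(x)))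
--     xs, ys, zs = [], [], []
--     i, n = 0, len(pairs)
--     while i < n:
--         j = i + 1
--         while j < n and pairs[j] == pairs[i]:
--             j += 1
--         xs.append(pairs[i][0])
--         ys.append(pairs[i][1])
--         zs.append(j - i)
--         i = j
--     return xs, ys, zs
-- ===== Notes on version B (the rewrite author's own statement) =====
-- stated objective: alternative
-- what changed: Replaces the hash-map counting pass plus sort-of-keys by sorting the raw pair list once and emitting counts as run lengths of consecutive equal pairs in one linear scan; no dict is maintained.
import Mathlib
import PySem

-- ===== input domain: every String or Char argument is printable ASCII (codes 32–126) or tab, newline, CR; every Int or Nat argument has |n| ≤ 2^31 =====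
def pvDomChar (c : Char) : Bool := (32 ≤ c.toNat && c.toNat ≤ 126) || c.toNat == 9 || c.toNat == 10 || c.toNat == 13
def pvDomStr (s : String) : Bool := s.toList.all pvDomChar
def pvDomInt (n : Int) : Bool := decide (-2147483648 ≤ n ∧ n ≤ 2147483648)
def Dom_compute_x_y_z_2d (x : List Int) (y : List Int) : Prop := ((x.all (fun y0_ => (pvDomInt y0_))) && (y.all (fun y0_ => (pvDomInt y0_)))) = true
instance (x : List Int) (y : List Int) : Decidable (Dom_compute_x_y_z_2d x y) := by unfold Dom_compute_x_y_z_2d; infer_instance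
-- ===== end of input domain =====

-- B replaces A's dict-counting pass + sort of the keys by sorting the raw pair list once and
-- reading counts off as run lengths of consecutive equal pairs (alternative algorithm, same cost).

-- ===== PORT A =====
-- d = {}; for i in range(0, len(x)): key = (x[i], y[i]); d[key] += 1 / d[key] = 1
def pvDictA (x y : List Int) : PySem.Dict (Int × Int) Int :=
  (PySem.List.pyRange 0 (PySem.List.len x)).foldl
    (fun d i =>
      let key := (PySem.List.pyGetD x i 0, PySem.List.pyGetD y i 0)
      if d.contains key then d.insert key (d.getD key 0 + 1) else d.insert key 1)
    PySem.Dict.empty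

-- for key in sorted(d): x.append(key[0]); y.append(key[1]); z.append(d[key])
def compute_x_y_z_2d (x : List Int) (y : List Int) : List Int × List Int × List Int :=
  let d := pvDictA x y
  (PySem.List.sorted d.keys (fun k => toLex k)).foldl
    (fun s key => (s.1 ++ [key.1], s.2.1 ++ [key.2], s.2.2 ++ [d.getD key 0]))
    ([], [], [])

-- ===== PORT B =====
-- the outer while of Source B: one run (inner while = takeWhile/dropWhile of equal pairs) per step
def pvRuns : List (Int × Int) → List Int × List Int × List Int
  | [] => ([], [], [])
  | p :: rest =>
      let r := pvRuns (rest.dropWhile (· == p))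
      (p.1 :: r.1, p.2 :: r.2.1, ((1 + (rest.takeWhile (· == p)).length : Nat) : Int) :: r.2.2)
  termination_by l => l.length
  decreasing_by
    simp only [List.length_cons]
    exact Nat.lt_succ_of_le (List.length_dropWhile_le _ _)

-- pairs = sorted((x[i], y[i]) for i in range(len(x))); then the run-grouping scan
def compute_x_y_z_2d_alt (x : List Int) (y : List Int) : List Int × List Int × List Int :=
  pvRuns (PySem.List.sorted
    ((PySem.List.pyRange 0 (PySem.List.len x)).map
      (fun i => (PySem.List.pyGetD x i 0, PySem.List.pyGetD y i 0)))
    (fun k => toLex k))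

-- ===== PRECONDITION & SPEC =====
-- Python A evaluates y[i] for every i < len(x): it raises IndexError iff len(y) < len(x); those inputs are excluded.
def Pre_compute_x_y_z_2d (x : List Int) (y : List Int) : Prop := x.length ≤ y.length
instance (x : List Int) (y : List Int) : Decidable (Pre_compute_x_y_z_2d x y) := by unfold Pre_compute_x_y_z_2d; infer_instance
def pvWitness_compute_x_y_z_2d : List Int × List Int := ([1, 2, 1], [0, 5, 0])

def Spec_compute_x_y_z_2d (x : List Int) (y : List Int) (out : List Int × List Int × List Int) : Prop := out = compute_x_y_z_2d_alt x y
instance (x : List Int) (y : List Int) (out : List Int × List Int × List Int) : Decidable (Spec_compute_x_y_z_2d x y out) := by unfold Spec_compute_x_y_z_2d; infer_instance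

-- ===== CLAIM (what is proved, stated in full; the proofs are below) =====
def Claim_equal_compute_x_y_z_2d : Prop := ∀ (x : List Int) (y : List Int), Dom_compute_x_y_z_2d x y → Pre_compute_x_y_z_2d x y → Spec_compute_x_y_z_2d x y (compute_x_y_z_2d x y)

-- ===== LEMMAS AND PROOFS =====

-- the list of pairs (x[i], y[i]) both programs count
def pvPairs (x y : List Int) : List (Int × Int) :=
  (PySem.List.pyRange 0 (PySem.List.len x)).map
    (fun i => (PySem.List.pyGetD x i 0, PySem.List.pyGetD y i 0))

lemma pvDictA_eq_counter (x y : List Int) : pvDictA x y = PySem.Dict.counter (pvPairs x y) := by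
  unfold pvDictA pvPairs
  rw [← PySem.Dict.foldl_insert_getD_add_one_eq_counter, List.foldl_map]
  apply PySem.List.foldl_congr_mem
  intro d i _
  by_cases h : d.contains (PySem.List.pyGetD x i 0, PySem.List.pyGetD y i 0) = true
  · simp only [h, if_true]
  · simp [eq_false_of_ne_true h, PySem.Dict.getD_of_not_contains d 0 (eq_false_of_ne_true h)]

-- canonical form of A's output
lemma pvA_char (x y : List Int) :
    compute_x_y_z_2d x y =
      ((PySem.List.sorted (PySem.Set.ofList (pvPairs x y)) (fun k => toLex k)).map Prod.fst,
       (PySem.List.sorted (PySem.Set.ofList (pvPairs x y)) (fun k => toLex k)).map Prod.snd,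
       (PySem.List.sorted (PySem.Set.ofList (pvPairs x y)) (fun k => toLex k)).map
         (fun k => ((pvPairs x y).count k : Int))) := by
  unfold compute_x_y_z_2d
  simp only [pvDictA_eq_counter, PySem.Dict.keys_counter]
  rw [PySem.List.foldl_prod_mk (f := fun a (k : Int × Int) => a ++ [k.1])
    (g := fun (b : List Int × List Int) (k : Int × Int) =>
      (b.1 ++ [k.2], b.2 ++ [(PySem.Dict.counter (pvPairs x y)).getD k 0]))]
  rw [PySem.List.foldl_prod_mk (f := fun a (k : Int × Int) => a ++ [k.2])
    (g := fun (b : List Int) (k : Int × Int) =>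
      b ++ [(PySem.Dict.counter (pvPairs x y)).getD k 0])]
  simp only [PySem.List.foldl_append_singleton_eq_map, List.nil_append,
    PySem.Dict.getD_counter]

-- dropWhile (== p) of a sorted tail whose elements all dominate p contains only strictly larger pairs
lemma pvDropWhile_gt (rest : List (Int × Int)) (p : Int × Int)
    (hall : ∀ q ∈ rest, (toLex p : Lex (Int × Int)) ≤ toLex q)
    (hsort : rest.Pairwise (fun a b => (toLex a : Lex (Int × Int)) ≤ toLex b)) :
    ∀ q ∈ rest.dropWhile (· == p), (toLex p : Lex (Int × Int)) < toLex q := by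
  induction rest with
  | nil => simp
  | cons a rest' ih =>
    intro q hq
    by_cases ha : (a == p) = true
    · simp only [List.dropWhile_cons, ha, if_true] at hq
      exact ih (fun r hr => hall r (List.mem_cons_of_mem a hr))
        (List.Pairwise.of_cons hsort) q hq
    · simp only [List.dropWhile_cons, ha, if_false, Bool.false_eq_true] at hq
      have hap : a ≠ p := fun e => ha (by simp [e])
      have hpa : (toLex p : Lex (Int × Int)) < toLex a :=
        lt_of_le_of_ne (hall a (List.mem_cons_self)) (fun e => hap ((id e).symm))
      rcases List.mem_cons.mp hq with rfl | hq'
      · exact hpa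
      · exact lt_of_lt_of_le hpa ((List.pairwise_cons.mp hsort).1 q hq')

-- canonical form of the run-grouping scan on a sorted list
lemma pvRuns_char (ps : List (Int × Int))
    (hsort : ps.Pairwise (fun a b => (toLex a : Lex (Int × Int)) ≤ toLex b)) :
    pvRuns ps =
      ((PySem.List.sorted (PySem.Set.ofList ps) (fun k => toLex k)).map Prod.fst,
       (PySem.List.sorted (PySem.Set.ofList ps) (fun k => toLex k)).map Prod.snd,
       (PySem.List.sorted (PySem.Set.ofList ps) (fun k => toLex k)).map
         (fun k => (ps.count k : Int))) := by
  induction ps using pvRuns.induct with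
  | case1 =>
    rw [pvRuns]
    rfl
  | case2 p rest ih =>
    have hp : ∀ q ∈ rest, (toLex p : Lex (Int × Int)) ≤ toLex q := (List.pairwise_cons.mp hsort).1
    have hrest : rest.Pairwise (fun a b => (toLex a : Lex (Int × Int)) ≤ toLex b) :=
      (List.pairwise_cons.mp hsort).2
    have hddsort : (rest.dropWhile (· == p)).Pairwise
        (fun a b => (toLex a : Lex (Int × Int)) ≤ toLex b) :=
      hrest.sublist (List.dropWhile_sublist _)
    have hgt := pvDropWhile_gt rest p hp hrest
    have hpnot : p ∉ rest.dropWhile (· == p) := fun h => absurd (hgt p h) (lt_irrefl _)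
    have hmemt : ∀ q ∈ rest.takeWhile (· == p), q = p := by
      intro q hq
      have := List.mem_takeWhile_imp hq
      simpa using this
    have hsplit : rest.takeWhile (· == p) ++ rest.dropWhile (· == p) = rest :=
      List.takeWhile_append_dropWhile
    have ihr := ih hddsort
    have hK'nodup : (PySem.List.sorted (PySem.Set.ofList (rest.dropWhile (· == p)))
        (fun k => toLex k)).Nodup :=
      (PySem.List.sorted_perm _ _ _).nodup_iff.mpr (PySem.Set.nodup_ofList _)
    have hK'mem : ∀ k ∈ PySem.List.sorted (PySem.Set.ofList (rest.dropWhile (· == p)))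
        (fun k => toLex k), k ∈ rest.dropWhile (· == p) := by
      intro k hk
      exact (PySem.Set.mem_ofList _ _).mp ((PySem.List.mem_sorted _ _ _ _).mp hk)
    have hK : PySem.List.sorted (PySem.Set.ofList (p :: rest)) (fun k => toLex k) =
        p :: PySem.List.sorted (PySem.Set.ofList (rest.dropWhile (· == p))) (fun k => toLex k) := by
      apply PySem.List.sorted_eq_of_perm_of_pairwise_lt
      · rw [List.perm_ext_iff_of_nodup
          (List.nodup_cons.mpr ⟨fun h => hpnot (hK'mem _ h), hK'nodup⟩)
          (PySem.Set.nodup_ofList _)]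
        intro a
        simp only [List.mem_cons, PySem.List.mem_sorted, PySem.Set.mem_ofList]
        constructor
        · rintro (rfl | h)
          · exact Or.inl rfl
          · exact Or.inr ((List.dropWhile_sublist _).subset h)
        · rintro (rfl | h)
          · exact Or.inl rfl
          · rw [← hsplit] at h
            rcases List.mem_append.mp h with h' | h'
            · exact Or.inl (hmemt _ h')
            · exact Or.inr h'
      · rw [List.pairwise_cons]
        refine ⟨fun q hq => hgt q (hK'mem q hq), ?_⟩
        have hle := PySem.List.sorted_pairwise (PySem.Set.ofList (rest.dropWhile (· == p)))
          (fun k => toLex k)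
        exact (hle.and hK'nodup).imp (fun h => lt_of_le_of_ne h.1 (fun e => h.2 e))
    have hcountp : (1 + (rest.takeWhile (· == p)).length : Nat) = List.count p (p :: rest) := by
      have h1 : List.count p rest = (rest.takeWhile (· == p)).length := by
        conv_lhs => rw [← hsplit]
        rw [List.count_append,
          List.count_eq_length.mpr (fun b hb => (hmemt b hb).symm),
          List.count_eq_zero.mpr hpnot]
        omega
      rw [List.count_cons_self, h1]
      omega
    have hcountk : ∀ k ∈ PySem.List.sorted (PySem.Set.ofList (rest.dropWhile (· == p)))
        (fun k => toLex k), List.count k (rest.dropWhile (· == p)) = List.count k (p :: rest) := by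
      intro k hk
      have hkd := hK'mem k hk
      have hkp : k ≠ p := fun e => absurd (hgt k hkd) (by rw [e]; exact lt_irrefl _)
      have hkt : k ∉ rest.takeWhile (· == p) := fun h => hkp (hmemt k h)
      have h1 : List.count k rest = List.count k (rest.dropWhile (· == p)) := by
        conv_lhs => rw [← hsplit]
        rw [List.count_append, List.count_eq_zero.mpr hkt, Nat.zero_add]
      rw [← h1, List.count_cons, if_neg (fun e => hkp (eq_of_beq e).symm), Nat.add_zero, h1]
    rw [pvRuns, ihr, hK]
    simp only [List.map_cons, Prod.mk.injEq]
    refine ⟨trivial, trivial, ?_⟩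
    congr 1
    · exact congrArg (fun n : Nat => (n : Int)) hcountp
    · apply List.map_congr_left
      intro k hk
      exact congrArg (fun n : Nat => (n : Int)) (hcountk k hk)

-- ===== VERDICT (by name: the statement is the Claim_ definition above) =====
theorem compute_x_y_z_2d_spec : Claim_equal_compute_x_y_z_2d := by
  intro x y _ _
  unfold Spec_compute_x_y_z_2d compute_x_y_z_2d_alt
  rw [pvA_char]
  have hps := pvRuns_char (PySem.List.sorted (pvPairs x y) (fun k => toLex k))
      (PySem.List.sorted_pairwise _ _)
  rw [show (PySem.List.sorted
        ((PySem.List.pyRange 0 (PySem.List.len x)).map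
          (fun i => (PySem.List.pyGetD x i 0, PySem.List.pyGetD y i 0)))
        (fun k => toLex k)) = PySem.List.sorted (pvPairs x y) (fun k => toLex k) from rfl]
  rw [hps]
  have hperm : (pvPairs x y).Perm (PySem.List.sorted (pvPairs x y) (fun k => toLex k)) :=
    (PySem.List.sorted_perm _ _ _).symm
  have hsetperm : (PySem.Set.ofList (PySem.List.sorted (pvPairs x y) (fun k => toLex k))).Perm
      (PySem.Set.ofList (pvPairs x y)) := by
    rw [List.perm_ext_iff_of_nodup (PySem.Set.nodup_ofList _) (PySem.Set.nodup_ofList _)]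
    intro a
    simp only [PySem.Set.mem_ofList, PySem.List.mem_sorted]
  rw [PySem.List.sorted_eq_sorted_of_perm _ _ (fun k => (toLex k : Lex (Int × Int)))
    (fun a b h => h) hsetperm]
  simp only [Prod.mk.injEq]
  refine ⟨trivial, trivial, ?_⟩
  apply List.map_congr_left
  intro k _
  exact congrArg _ (hperm.count_eq k)
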